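-- pv_equiv track=rewrite | github.com/site-chenwei/skills-hub | skills/harmony-build/scripts/harmony_build.py | split_repeated_csv
-- ===== SOURCE A (Python) =====
-- def unique_values(values):
--     seen = set()
--     result = []
--     for item in values:
--         if item is None:
--             continue
--         normalized = str(item).strip()
--         if not normalized or normalized in seen:
--             continue
--         seen.add(normalized)
--         result.append(normalized)
--     return result
--
-- def split_repeated_csv(values: list[str] | None) -> list[str]:
--     parts = []
--     for value in values or []:
--         for part in value.split(","):
--             normalized = part.strip()
--             if normalized:
--                 parts.append(normalized)
--     return unique_values(parts)
-- ===== SOURCE B (Python) =====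
-- def split_repeated_csv(values):
--     parts = [part.strip() for value in (values or []) for part in value.split(",")]
--     result = []
--     while parts:
--         head, parts = parts[0], parts[1:]
--         if head:
--             result.append(head)
--             parts = [x for x in parts if x != head]
--     return result
-- ===== Notes on version B (the rewrite author's own statement) =====
-- stated objective: alternative
-- what changed: Replaces A's staged pipeline (build a parts list in nested loops, then deduplicate with a seen-set helper) by a worklist removal algorithm: one flat comprehension of stripped parts, then repeatedly pop the head and delete all of its later occurrences from the remaining worklist, so no seen set and no membership test exist at all.
import Mathlib
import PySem

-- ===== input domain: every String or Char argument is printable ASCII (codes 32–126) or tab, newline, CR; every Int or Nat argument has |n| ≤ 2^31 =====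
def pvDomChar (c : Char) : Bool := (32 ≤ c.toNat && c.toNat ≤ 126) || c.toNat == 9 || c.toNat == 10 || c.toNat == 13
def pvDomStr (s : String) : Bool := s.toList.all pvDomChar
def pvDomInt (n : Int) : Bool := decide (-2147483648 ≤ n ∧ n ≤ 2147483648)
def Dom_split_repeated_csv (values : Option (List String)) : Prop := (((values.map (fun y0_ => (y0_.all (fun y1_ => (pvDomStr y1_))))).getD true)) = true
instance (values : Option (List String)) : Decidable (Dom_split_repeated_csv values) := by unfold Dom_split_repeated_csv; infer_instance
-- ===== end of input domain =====

-- B replaces A's staged pipeline (nested accumulator loops + a seen-set dedup helper) by a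
-- worklist removal algorithm: pop the head, keep it if nonempty, and delete all its later
-- occurrences from the remaining worklist (no seen set, no membership test).

-- ===== PORT A =====
-- helper unique_values: items are Strings here, so `item is None` never fires and str(item) = item
def unique_values (vals : List String) : List String :=
  (vals.foldl
    (fun (acc : PySem.Set String × List String) item =>
      let normalized := PySem.Str.strip item
      if normalized = "" ∨ PySem.Set.contains acc.1 normalized then acc
      else (PySem.Set.add acc.1 normalized, acc.2 ++ [normalized]))
    (PySem.Set.empty, [])).2

def split_repeated_csv (values : Option (List String)) : List String :=
  let parts :=
    (values.getD []).foldl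
      (fun parts value =>
        ((PySem.Str.split? value ",").getD []).foldl
          (fun parts part =>
            let normalized := PySem.Str.strip part
            if normalized ≠ "" then parts ++ [normalized] else parts)
          parts)
      []
  unique_values parts

-- ===== PORT B =====
-- the while loop of Source B: state = (parts worklist, result accumulator)
def dedupWorklist (parts : List String) (result : List String) : List String :=
  match parts with
  | [] => result
  | head :: tail =>
      if head ≠ "" then dedupWorklist (tail.filter (fun x => x ≠ head)) (result ++ [head])
      else dedupWorklist tail result
termination_by parts.length
decreasing_by
  · simpa using List.length_filter_le _ tail.attach
  · simp

def split_repeated_csv_alt (values : Option (List String)) : List String :=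
  let parts :=
    (values.getD []).flatMap (fun value => ((PySem.Str.split? value ",").getD []).map PySem.Str.strip)
  dedupWorklist parts []

-- ===== PRECONDITION & SPEC =====
def Spec_split_repeated_csv (values : Option (List String)) (out : List String) : Prop := out = split_repeated_csv_alt values
instance (values : Option (List String)) (out : List String) : Decidable (Spec_split_repeated_csv values out) := by unfold Spec_split_repeated_csv; infer_instance

-- ===== CLAIM (what is proved, stated in full; the proofs are below) =====
def Claim_equal_split_repeated_csv : Prop := ∀ (values : Option (List String)), Dom_split_repeated_csv values → Spec_split_repeated_csv values (split_repeated_csv values)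

-- ===== LEMMAS AND PROOFS =====

-- pure removal-dedup: keep the head, delete its later occurrences (the common form both ports reduce to)
def dedupRm : List String → List String
  | [] => []
  | h :: t => h :: dedupRm (t.filter (fun x => x ≠ h))
termination_by l => l.length
decreasing_by simpa using List.length_filter_le _ t.attach

theorem dedupRm_nil : dedupRm [] = [] := by rw [dedupRm]
theorem dedupRm_cons (h : String) (t : List String) :
    dedupRm (h :: t) = h :: dedupRm (t.filter (fun x => x ≠ h)) := by rw [dedupRm]

-- dropWhile is idempotent
theorem dropWhile_dropWhile (p : Char → Bool) (l : List Char) :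
    (l.dropWhile p).dropWhile p = l.dropWhile p := by
  induction l with
  | nil => rfl
  | cons a t ih =>
    by_cases h : p a = true
    · simp [h, ih]
    · simp [h]

-- dropWhile is the identity on prefixes of dropWhile-fixed lists
theorem dropWhile_eq_self_of_prefix (p : Char → Bool) {l m : List Char}
    (h : l <+: m) (hm : m.dropWhile p = m) : l.dropWhile p = l := by
  cases l with
  | nil => rfl
  | cons a t =>
    obtain ⟨r, hr⟩ := h
    by_cases hp : p a = true
    · exfalso
      subst hr
      rw [List.cons_append, List.dropWhile_cons, if_pos hp] at hm
      have := List.length_dropWhile_le p (t ++ r)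
      rw [hm] at this
      simp [List.length_cons] at this
    · rw [List.dropWhile_cons, if_neg hp]

theorem chars_strip_idem (s : List Char) :
    PySem.Chars.strip (PySem.Chars.strip s) = PySem.Chars.strip s := by
  unfold PySem.Chars.strip PySem.Chars.rstrip PySem.Chars.lstrip
  set p := PySem.Chars.isspace
  set L := s.dropWhile p with hL
  have hLfix : L.dropWhile p = L := dropWhile_dropWhile p s
  set R := (L.reverse.dropWhile p).reverse with hR
  have hRrev : R.reverse = L.reverse.dropWhile p := by simp [hR]
  have hpre : R <+: L := by
    rw [← List.reverse_suffix, hRrev]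
    exact List.dropWhile_suffix p
  have h1 : R.dropWhile p = R := dropWhile_eq_self_of_prefix p hpre hLfix
  rw [h1, hRrev, dropWhile_dropWhile, ← hRrev, List.reverse_reverse]

theorem str_strip_idem (s : String) :
    PySem.Str.strip (PySem.Str.strip s) = PySem.Str.strip s := by
  apply String.toList_injective
  rw [PySem.Str.toList_strip, PySem.Str.toList_strip, chars_strip_idem,
    ← PySem.Str.toList_strip]

-- the unique_values loop, on already-stripped nonempty strings, is foldl Set.add on both components
theorem uv_loop (l : List String) (s : PySem.Set String)
    (h : ∀ x ∈ l, PySem.Str.strip x = x ∧ x ≠ "") :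
    l.foldl
      (fun (acc : PySem.Set String × List String) item =>
        let normalized := PySem.Str.strip item
        if normalized = "" ∨ PySem.Set.contains acc.1 normalized then acc
        else (PySem.Set.add acc.1 normalized, acc.2 ++ [normalized]))
      (s, s)
    = (l.foldl PySem.Set.add s, l.foldl PySem.Set.add s) := by
  induction l generalizing s with
  | nil => rfl
  | cons a t ih =>
    obtain ⟨ha, hne⟩ := h a (List.mem_cons_self ..)
    have ht : ∀ x ∈ t, PySem.Str.strip x = x ∧ x ≠ "" := fun x hx => h x (List.mem_cons_of_mem _ hx)
    rw [List.foldl_cons, List.foldl_cons]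
    by_cases hc : PySem.Set.contains s a = true
    · have hc' : a ∈ s := by simpa [PySem.Set.contains] using hc
      have hset : PySem.Set.add s a = s := by simp [PySem.Set.add, PySem.Set.contains, hc']
      simp only [ha, hne, hc, or_true, if_true, hset]
      exact ih s ht
    · have hc' : a ∉ s := by simpa [PySem.Set.contains] using hc
      have hset : PySem.Set.add s a = s ++ [a] := by simp [PySem.Set.add, PySem.Set.contains, hc']
      simp only [ha, hne, hc, or_false, Bool.false_eq_true, if_false, hset]
      exact ih (s ++ [a]) ht

-- foldl Set.add = append the removal-dedup of the not-yet-seen elements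
theorem foldl_add_eq_dedupRm (l : List String) (s : PySem.Set String) :
    l.foldl PySem.Set.add s = s ++ dedupRm (l.filter (fun x => !(PySem.Set.contains s x))) := by
  induction l generalizing s with
  | nil => simp [dedupRm_nil]
  | cons a t ih =>
    rw [List.foldl_cons]
    by_cases hc : PySem.Set.contains s a = true
    · have hc' : a ∈ s := by simpa [PySem.Set.contains] using hc
      have hset : PySem.Set.add s a = s := by simp [PySem.Set.add, PySem.Set.contains, hc']
      rw [hset, ih, List.filter_cons, if_neg (by simp [hc'])]
    · have hc' : a ∉ s := by simpa [PySem.Set.contains] using hc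
      have hset : PySem.Set.add s a = s ++ [a] := by simp [PySem.Set.add, PySem.Set.contains, hc']
      rw [hset, ih, List.filter_cons, if_pos (by simp [hc']), dedupRm_cons, List.append_assoc,
        List.singleton_append]
      congr 2
      congr 1
      rw [List.filter_filter]
      apply List.filter_congr
      intro x _
      simp [PySem.Set.contains, Bool.and_comm]

theorem unique_values_eq_dedupRm (l : List String)
    (h : ∀ x ∈ l, PySem.Str.strip x = x ∧ x ≠ "") :
    unique_values l = dedupRm l := by
  unfold unique_values
  have he : (PySem.Set.empty, ([] : List String)) = ((PySem.Set.empty : PySem.Set String), (PySem.Set.empty : PySem.Set String)) := rfl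
  rw [he, uv_loop l _ h]
  show l.foldl PySem.Set.add PySem.Set.empty = dedupRm l
  rw [foldl_add_eq_dedupRm]
  simp [PySem.Set.empty, PySem.Set.contains]

-- A's inner loop appends the nonempty stripped parts
theorem inner_loop (l : List String) (acc : List String) :
    l.foldl
      (fun parts part =>
        let normalized := PySem.Str.strip part
        if normalized ≠ "" then parts ++ [normalized] else parts)
      acc
    = acc ++ (l.map PySem.Str.strip).filter (fun p => p ≠ "") := by
  induction l generalizing acc with
  | nil => simp
  | cons a t ih =>
    rw [List.foldl_cons, List.map_cons, List.filter_cons]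
    by_cases hne : PySem.Str.strip a = ""
    · rw [ih]; simp [hne]
    · rw [ih]; simp [hne]

-- A's outer loop builds the flatMap of filtered stripped splits
theorem outer_loop (vs : List String) (acc : List String) :
    vs.foldl
      (fun parts value =>
        ((PySem.Str.split? value ",").getD []).foldl
          (fun parts part =>
            let normalized := PySem.Str.strip part
            if normalized ≠ "" then parts ++ [normalized] else parts)
          parts)
      acc
    = acc ++ vs.flatMap (fun v => (((PySem.Str.split? v ",").getD []).map PySem.Str.strip).filter (fun p => p ≠ "")) := by
  induction vs generalizing acc with
  | nil => simp
  | cons a t ih =>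
    rw [List.foldl_cons, inner_loop, ih, List.flatMap_cons, List.append_assoc]

theorem flatMap_filter (vs : List String) :
    (vs.flatMap (fun v => ((PySem.Str.split? v ",").getD []).map PySem.Str.strip)).filter (fun p => p ≠ "")
    = vs.flatMap (fun v => (((PySem.Str.split? v ",").getD []).map PySem.Str.strip).filter (fun p => p ≠ "")) := by
  induction vs with
  | nil => rfl
  | cons a t ih => rw [List.flatMap_cons, List.flatMap_cons, List.filter_append, ih]

theorem parts_shape (vs : List String) (x : String)
    (hx : x ∈ vs.flatMap (fun v => (((PySem.Str.split? v ",").getD []).map PySem.Str.strip).filter (fun p => p ≠ ""))) :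
    PySem.Str.strip x = x ∧ x ≠ "" := by
  rw [List.mem_flatMap] at hx
  obtain ⟨v, _, hxv⟩ := hx
  rw [List.mem_filter] at hxv
  obtain ⟨hmem, hne⟩ := hxv
  rw [List.mem_map] at hmem
  obtain ⟨p, _, hp⟩ := hmem
  refine ⟨?_, by simpa using hne⟩
  rw [← hp, str_strip_idem]

-- B's worklist loop = accumulator ++ removal-dedup of the nonempty entries (strong induction on length)
theorem dedupWorklist_eq (n : Nat) : ∀ parts acc : List String, parts.length ≤ n →
    dedupWorklist parts acc = acc ++ dedupRm (parts.filter (fun x => x ≠ "")) := by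
  induction n with
  | zero =>
    intro parts acc h
    have : parts = [] := List.eq_nil_of_length_eq_zero (Nat.le_zero.mp h)
    subst this
    simp [dedupWorklist, dedupRm_nil]
  | succ n ih =>
    intro parts acc h
    match parts with
    | [] => simp [dedupWorklist, dedupRm_nil]
    | head :: tail =>
      by_cases hne : head = ""
      · rw [dedupWorklist, if_neg (by simp [hne]),
          ih tail acc (by simpa using Nat.le_of_succ_le_succ h),
          List.filter_cons, if_neg (by simp [hne])]
      · rw [dedupWorklist, if_pos (by simpa using hne),
          ih _ (acc ++ [head]) (le_trans (List.length_filter_le _ _) (by simpa using Nat.le_of_succ_le_succ h)),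
          List.filter_cons, if_pos (by simpa using hne), dedupRm_cons,
          List.append_assoc, List.singleton_append]
        congr 2
        congr 1
        rw [List.filter_filter, List.filter_filter]
        apply List.filter_congr
        intro x _
        exact Bool.and_comm _ _

-- ===== VERDICT (by name: the statement is the Claim_ definition above) =====
theorem split_repeated_csv_spec : Claim_equal_split_repeated_csv := by
  intro values _
  unfold Spec_split_repeated_csv split_repeated_csv split_repeated_csv_alt
  rw [outer_loop, List.nil_append, dedupWorklist_eq _ _ _ (le_refl _), List.nil_append,
    flatMap_filter]
  exact unique_values_eq_dedupRm _ (parts_shape (values.getD []))
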